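-- pv_equiv track=rewrite | github.com/baptistecottier/advents-of-code | events/2024/12/12.py | get_region_morphology
-- ===== SOURCE A (Python) =====
-- def get_region_morphology(region):
--     """Given a region, this function returns area, length of the parameter,
--     and the number of corners. To find the perimeter length, for each point, we
--     check if its neighbours are in the region or not. If not, perimeter length is
--     incremented by one for each neighbour found to be not in the region. Then, based
--     on the corners patterns below, we can compute the numbers of corners.
--
--     Legend:
--         # - location in the region
--         . - location not in the region
--         ? - location that can be either in or out the region
--
--     (dx, dy) ||     (1, 0)     |     (0, 1)     |     (-1, 0)    |     (0, -1)
--     ------------------------------------------------------------------------------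
--     Group    ||  Outer  Inner  |  Outer  Inner  |  Outer  Inner  |  Outer  Inner
--     ------------------------------------------------------------------------------
--              ||   ?.?    ?##   |   ???    ???   |   ???    ???   |   ?.?    .#?
--     Pattern  ||   ?#.    ?#.   |   ?#.    ?#.   |   .#?    ##?   |   .#?    ##?
--              ||   ???    ???   |   ?.?    ?##   |   ?.?    .#?   |   ???    ???
--     """
--     corners = 0
--     length  = 0
--     for (x, y) in sorted(region):
--         for dx, dy in ((1, 0), (-1, 0), (0, 1), (0, -1)):
--             if (x + dx, y + dy) not in region:
--                 length += 1
--                 if (x + dy, y - dx) not in region :         # Outer corner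
--                     corners += 1
--                 elif (x + dx + dy, y - dx + dy) in region:  # Inner corner
--                     corners += 1
--     return len(region), length, corners
-- ===== SOURCE B (Python) =====
-- def get_region_morphology(region):
--     cells = set(region)
--     length = 0
--     corners = 0
--     for (x, y) in region:
--         for da in (1, -1):
--             for db in (1, -1):
--                 h = (x + da, y) in cells
--                 v = (x, y + db) in cells
--                 if not h and not v:
--                     corners += 1
--                 elif h and v and (x + da, y + db) not in cells:
--                     corners += 1
--         for nb in ((x + 1, y), (x - 1, y), (x, y + 1), (x, y - 1)):
--             if nb not in cells:
--                 length += 1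
--     return len(region), length, corners
-- ===== Notes on version B (the rewrite author's own statement) =====
-- stated objective: alternative
-- what changed: Drops the sorted() pass (totals are order-independent) and replaces the rotate-per-edge outer/inner corner classification with a per-diagonal convex/concave test (corner where both orthogonal neighbours are absent, or both present with the diagonal absent).
import Mathlib
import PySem

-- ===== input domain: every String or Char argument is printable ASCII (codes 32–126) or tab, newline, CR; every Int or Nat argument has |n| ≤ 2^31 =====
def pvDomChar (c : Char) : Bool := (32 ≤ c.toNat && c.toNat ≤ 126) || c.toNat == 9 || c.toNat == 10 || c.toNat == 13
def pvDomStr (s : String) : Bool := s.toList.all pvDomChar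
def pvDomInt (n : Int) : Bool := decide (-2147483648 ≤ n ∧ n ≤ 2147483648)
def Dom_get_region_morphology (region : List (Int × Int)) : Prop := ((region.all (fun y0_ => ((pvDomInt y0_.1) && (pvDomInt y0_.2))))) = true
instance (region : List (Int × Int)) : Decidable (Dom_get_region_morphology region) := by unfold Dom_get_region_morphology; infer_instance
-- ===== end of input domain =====

-- B drops the sort and counts corners by a per-diagonal convex/concave test instead of
-- A's per-edge outer/inner rotation test (objective: alternative decomposition).

-- ===== PORT A =====
def pyDirs : List (Int × Int) := [(1, 0), (-1, 0), (0, 1), (0, -1)]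

def get_region_morphology (region : List (Int × Int)) : Int × Int × Int :=
  -- accumulator = (corners, length), as in A
  let st := (PySem.List.sorted2 region (fun c => c.1) (fun c => c.2)).foldl
    (fun (acc : Int × Int) c =>
      pyDirs.foldl (fun (acc : Int × Int) d =>
        if (c.1 + d.1, c.2 + d.2) ∈ region then acc
        else
          if (c.1 + d.2, c.2 - d.1) ∈ region then       -- not an Outer corner
            if (c.1 + d.1 + d.2, c.2 - d.1 + d.2) ∈ region then  -- Inner corner
              (acc.1 + 1, acc.2 + 1)
            else (acc.1, acc.2 + 1)
          else (acc.1 + 1, acc.2 + 1)) acc) ((0 : Int), (0 : Int))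
  ((region.length : Int), st.2, st.1)

-- ===== PORT B =====
def get_region_morphology_alt (region : List (Int × Int)) : Int × Int × Int :=
  let cells : PySem.Set (Int × Int) := PySem.Set.ofList region
  -- accumulator = (corners, length), as in Source B
  let st := region.foldl
    (fun (acc : Int × Int) c =>
      let acc := [(1 : Int), -1].foldl (fun acc2 da =>
        [(1 : Int), -1].foldl (fun (acc3 : Int × Int) db =>
          let h := (c.1 + da, c.2) ∈ cells
          let v := (c.1, c.2 + db) ∈ cells
          if ¬h ∧ ¬v then (acc3.1 + 1, acc3.2)
          else if h ∧ v ∧ (c.1 + da, c.2 + db) ∉ cells then (acc3.1 + 1, acc3.2)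
          else acc3) acc2) acc
      [(c.1 + 1, c.2), (c.1 - 1, c.2), (c.1, c.2 + 1), (c.1, c.2 - 1)].foldl
        (fun (acc4 : Int × Int) nb => if nb ∈ cells then acc4 else (acc4.1, acc4.2 + 1)) acc)
    ((0 : Int), (0 : Int))
  ((region.length : Int), st.2, st.1)

-- ===== PRECONDITION & SPEC =====
-- Python A receives `region` as a set of cells (py_type set[tuple[int,int]]); Pre_ only
-- states the List argument models that set: its elements are distinct. It excludes no
-- input of A's real domain (every Python set maps to a duplicate-free list).
def Pre_get_region_morphology (region : List (Int × Int)) : Prop := region.Nodup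
instance (region : List (Int × Int)) : Decidable (Pre_get_region_morphology region) := by
  unfold Pre_get_region_morphology; infer_instance

def pvWitness_get_region_morphology : (List (Int × Int)) := [(0, 0), (1, 0), (0, 1)]

def Spec_get_region_morphology (region : List (Int × Int)) (out : Int × Int × Int) : Prop := out = get_region_morphology_alt region
instance (region : List (Int × Int)) (out : Int × Int × Int) : Decidable (Spec_get_region_morphology region out) := by unfold Spec_get_region_morphology; infer_instance

-- ===== CLAIM (what is proved, stated in full; the proofs are below) =====
def Claim_equal_get_region_morphology : Prop := ∀ (region : List (Int × Int)), Dom_get_region_morphology region → Pre_get_region_morphology region → Spec_get_region_morphology region (get_region_morphology region)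

-- ===== LEMMAS AND PROOFS =====

def ind (P : Prop) [Decidable P] : Int := if P then 1 else 0

-- per-direction contribution of A's inner loop body (corner part / perimeter part)
def cA1 (R : List (Int × Int)) (c d : Int × Int) : Int :=
  if (c.1 + d.1, c.2 + d.2) ∈ R then 0
  else if (c.1 + d.2, c.2 - d.1) ∈ R then (if (c.1 + d.1 + d.2, c.2 - d.1 + d.2) ∈ R then 1 else 0)
  else 1
def lenD (R : List (Int × Int)) (c d : Int × Int) : Int :=
  if (c.1 + d.1, c.2 + d.2) ∈ R then 0 else 1
def cornA (R : List (Int × Int)) (c : Int × Int) : Int :=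
  cA1 R c (1, 0) + cA1 R c (-1, 0) + cA1 R c (0, 1) + cA1 R c (0, -1)
def perim (R : List (Int × Int)) (c : Int × Int) : Int :=
  lenD R c (1, 0) + lenD R c (-1, 0) + lenD R c (0, 1) + lenD R c (0, -1)

-- per-pair contribution of B's corner loop body
def cB1 (R : List (Int × Int)) (c : Int × Int) (da db : Int) : Int :=
  if ¬((c.1 + da, c.2) ∈ R) ∧ ¬((c.1, c.2 + db) ∈ R) then 1
  else if (c.1 + da, c.2) ∈ R ∧ (c.1, c.2 + db) ∈ R ∧ (c.1 + da, c.2 + db) ∉ R then 1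
  else 0
def cornB (R : List (Int × Int)) (c : Int × Int) : Int :=
  cB1 R c 1 1 + cB1 R c 1 (-1) + cB1 R c (-1) 1 + cB1 R c (-1) (-1)
def perimB (R : List (Int × Int)) (c : Int × Int) : Int :=
  (if (c.1 + 1, c.2) ∈ R then 0 else 1) + (if (c.1 - 1, c.2) ∈ R then 0 else 1)
  + (if (c.1, c.2 + 1) ∈ R then 0 else 1) + (if (c.1, c.2 - 1) ∈ R then 0 else 1)

-- the four convex-corner tests (B's, also A's outer tests up to reindexing),
-- A's inner tests, and B's concave tests
abbrev conv0 (R : List (Int × Int)) (c : Int × Int) : Prop := (c.1 + 1, c.2) ∉ R ∧ (c.1, c.2 + 1) ∉ R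
abbrev conv1 (R : List (Int × Int)) (c : Int × Int) : Prop := (c.1 + 1, c.2) ∉ R ∧ (c.1, c.2 - 1) ∉ R
abbrev conv2 (R : List (Int × Int)) (c : Int × Int) : Prop := (c.1 - 1, c.2) ∉ R ∧ (c.1, c.2 + 1) ∉ R
abbrev conv3 (R : List (Int × Int)) (c : Int × Int) : Prop := (c.1 - 1, c.2) ∉ R ∧ (c.1, c.2 - 1) ∉ R
abbrev inner0 (R : List (Int × Int)) (c : Int × Int) : Prop :=
  (c.1 + 1, c.2) ∉ R ∧ (c.1, c.2 - 1) ∈ R ∧ (c.1 + 1, c.2 - 1) ∈ R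
abbrev inner1 (R : List (Int × Int)) (c : Int × Int) : Prop :=
  (c.1 - 1, c.2) ∉ R ∧ (c.1, c.2 + 1) ∈ R ∧ (c.1 - 1, c.2 + 1) ∈ R
abbrev inner2 (R : List (Int × Int)) (c : Int × Int) : Prop :=
  (c.1, c.2 + 1) ∉ R ∧ (c.1 + 1, c.2) ∈ R ∧ (c.1 + 1, c.2 + 1) ∈ R
abbrev inner3 (R : List (Int × Int)) (c : Int × Int) : Prop :=
  (c.1, c.2 - 1) ∉ R ∧ (c.1 - 1, c.2) ∈ R ∧ (c.1 - 1, c.2 - 1) ∈ R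
abbrev conc0 (R : List (Int × Int)) (c : Int × Int) : Prop :=
  (c.1 + 1, c.2) ∈ R ∧ (c.1, c.2 + 1) ∈ R ∧ (c.1 + 1, c.2 + 1) ∉ R
abbrev conc1 (R : List (Int × Int)) (c : Int × Int) : Prop :=
  (c.1 + 1, c.2) ∈ R ∧ (c.1, c.2 - 1) ∈ R ∧ (c.1 + 1, c.2 - 1) ∉ R
abbrev conc2 (R : List (Int × Int)) (c : Int × Int) : Prop :=
  (c.1 - 1, c.2) ∈ R ∧ (c.1, c.2 + 1) ∈ R ∧ (c.1 - 1, c.2 + 1) ∉ R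
abbrev conc3 (R : List (Int × Int)) (c : Int × Int) : Prop :=
  (c.1 - 1, c.2) ∈ R ∧ (c.1, c.2 - 1) ∈ R ∧ (c.1 - 1, c.2 - 1) ∉ R

-- ---- step lemmas: each fold step adds the per-cell contributions ----

theorem stepA1 (R : List (Int × Int)) (c : Int × Int) (acc : Int × Int) (d : Int × Int) :
    (if (c.1 + d.1, c.2 + d.2) ∈ R then acc
     else
       if (c.1 + d.2, c.2 - d.1) ∈ R then
         if (c.1 + d.1 + d.2, c.2 - d.1 + d.2) ∈ R then (acc.1 + 1, acc.2 + 1)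
         else (acc.1, acc.2 + 1)
       else (acc.1 + 1, acc.2 + 1))
    = (acc.1 + cA1 R c d, acc.2 + lenD R c d) := by
  simp only [cA1, lenD]
  split_ifs <;> simp

theorem stepA (R : List (Int × Int)) (c : Int × Int) (acc : Int × Int) :
    pyDirs.foldl (fun (acc : Int × Int) d =>
        if (c.1 + d.1, c.2 + d.2) ∈ R then acc
        else
          if (c.1 + d.2, c.2 - d.1) ∈ R then
            if (c.1 + d.1 + d.2, c.2 - d.1 + d.2) ∈ R then (acc.1 + 1, acc.2 + 1)
            else (acc.1, acc.2 + 1)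
          else (acc.1 + 1, acc.2 + 1)) acc
      = (acc.1 + cornA R c, acc.2 + perim R c) := by
  simp only [pyDirs, List.foldl, stepA1, cornA, perim, Prod.mk.injEq]
  constructor <;> ring

theorem stepBrow (R : List (Int × Int)) (c : Int × Int) (acc : Int × Int) (da : Int) :
    ([(1 : Int), -1].foldl (fun (acc3 : Int × Int) db =>
          let h := (c.1 + da, c.2) ∈ R
          let v := (c.1, c.2 + db) ∈ R
          if ¬h ∧ ¬v then (acc3.1 + 1, acc3.2)
          else if h ∧ v ∧ (c.1 + da, c.2 + db) ∉ R then (acc3.1 + 1, acc3.2)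
          else acc3) acc)
      = (acc.1 + (cB1 R c da 1 + cB1 R c da (-1)), acc.2) := by
  simp only [List.foldl, cB1]
  split_ifs <;> simp_all <;> ring

theorem stepB (R : List (Int × Int)) (c : Int × Int) (acc : Int × Int) :
    ([(1 : Int), -1].foldl (fun acc2 da =>
        [(1 : Int), -1].foldl (fun (acc3 : Int × Int) db =>
          let h := (c.1 + da, c.2) ∈ R
          let v := (c.1, c.2 + db) ∈ R
          if ¬h ∧ ¬v then (acc3.1 + 1, acc3.2)
          else if h ∧ v ∧ (c.1 + da, c.2 + db) ∉ R then (acc3.1 + 1, acc3.2)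
          else acc3) acc2) acc)
      = (acc.1 + cornB R c, acc.2) := by
  have hrow : (fun (acc2 : Int × Int) (da : Int) =>
      [(1 : Int), -1].foldl (fun (acc3 : Int × Int) db =>
          let h := (c.1 + da, c.2) ∈ R
          let v := (c.1, c.2 + db) ∈ R
          if ¬h ∧ ¬v then (acc3.1 + 1, acc3.2)
          else if h ∧ v ∧ (c.1 + da, c.2 + db) ∉ R then (acc3.1 + 1, acc3.2)
          else acc3) acc2)
      = fun (acc2 : Int × Int) (da : Int) =>
          (acc2.1 + (cB1 R c da 1 + cB1 R c da (-1)), acc2.2) := by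
    funext acc2 da
    exact stepBrow R c acc2 da
  rw [hrow]
  simp only [List.foldl, cornB, Prod.mk.injEq]
  exact ⟨by ring, trivial⟩

theorem stepBlen (R : List (Int × Int)) (c : Int × Int) (acc : Int × Int) :
    ([(c.1 + 1, c.2), (c.1 - 1, c.2), (c.1, c.2 + 1), (c.1, c.2 - 1)].foldl
        (fun (acc4 : Int × Int) nb => if nb ∈ R then acc4 else (acc4.1, acc4.2 + 1)) acc)
      = (acc.1, acc.2 + perimB R c) := by
  simp only [List.foldl, perimB]
  split_ifs <;> simp <;> ring

-- the two per-cell perimeter counts coincide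
theorem perim_eq (R : List (Int × Int)) (c : Int × Int) : perim R c = perimB R c := by
  simp only [perim, lenD, perimB]
  norm_num [sub_eq_add_neg]

-- ---- folds of componentwise-additive steps are sums ----
theorem foldl_pair_add (l : List (Int × Int)) (g h : Int × Int → Int)
    (step : Int × Int → Int × Int → Int × Int)
    (hstep : ∀ acc c, step acc c = (acc.1 + g c, acc.2 + h c)) :
    ∀ a b : Int, l.foldl step (a, b) = (a + (l.map g).sum, b + (l.map h).sum) := by
  induction l with
  | nil => simp
  | cons x t ih =>
    intro a b
    simp only [List.foldl_cons, hstep, List.map_cons, List.sum_cons]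
    rw [ih]
    ring_nf

-- ---- the contributions as indicator sums ----
theorem genA (R : List (Int × Int)) (c d : Int × Int) :
    cA1 R c d
      = ind ((c.1 + d.1, c.2 + d.2) ∉ R ∧ (c.1 + d.2, c.2 - d.1) ∉ R)
        + ind ((c.1 + d.1, c.2 + d.2) ∉ R ∧ (c.1 + d.2, c.2 - d.1) ∈ R ∧
            (c.1 + d.1 + d.2, c.2 - d.1 + d.2) ∈ R) := by
  simp only [cA1, ind]
  split_ifs <;> simp_all

theorem genB (R : List (Int × Int)) (c : Int × Int) (da db : Int) :
    cB1 R c da db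
      = ind ((c.1 + da, c.2) ∉ R ∧ (c.1, c.2 + db) ∉ R)
        + ind ((c.1 + da, c.2) ∈ R ∧ (c.1, c.2 + db) ∈ R ∧ (c.1 + da, c.2 + db) ∉ R) := by
  simp only [cB1, ind]
  split_ifs <;> simp_all

theorem ind_iff {P Q : Prop} [Decidable P] [Decidable Q] (h : P ↔ Q) : ind P = ind Q := by
  simp [ind, h]

theorem bridgeA0 (R : List (Int × Int)) (c : Int × Int) :
    cA1 R c (1, 0) = ind (conv1 R c) + ind (inner0 R c) := by
  rw [genA]
  congr 1 <;> apply ind_iff <;> constructor <;> intro h <;> norm_num at h ⊢ <;> tauto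
theorem bridgeA1 (R : List (Int × Int)) (c : Int × Int) :
    cA1 R c (-1, 0) = ind (conv2 R c) + ind (inner1 R c) := by
  rw [genA]
  congr 1 <;> apply ind_iff <;> constructor <;> intro h <;>
    norm_num [sub_eq_add_neg] at h ⊢ <;> tauto
theorem bridgeA2 (R : List (Int × Int)) (c : Int × Int) :
    cA1 R c (0, 1) = ind (conv0 R c) + ind (inner2 R c) := by
  rw [genA]
  congr 1 <;> apply ind_iff <;> constructor <;> intro h <;> norm_num at h ⊢ <;> tauto
theorem bridgeA3 (R : List (Int × Int)) (c : Int × Int) :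
    cA1 R c (0, -1) = ind (conv3 R c) + ind (inner3 R c) := by
  rw [genA]
  congr 1 <;> apply ind_iff <;> constructor <;> intro h <;>
    norm_num [sub_eq_add_neg] at h ⊢ <;> tauto
theorem bridgeB0 (R : List (Int × Int)) (c : Int × Int) :
    cB1 R c 1 1 = ind (conv0 R c) + ind (conc0 R c) := by
  rw [genB]
theorem bridgeB1 (R : List (Int × Int)) (c : Int × Int) :
    cB1 R c 1 (-1) = ind (conv1 R c) + ind (conc1 R c) := by
  rw [genB]
  congr 1
theorem bridgeB2 (R : List (Int × Int)) (c : Int × Int) :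
    cB1 R c (-1) 1 = ind (conv2 R c) + ind (conc2 R c) := by
  rw [genB]
  congr 1
theorem bridgeB3 (R : List (Int × Int)) (c : Int × Int) :
    cB1 R c (-1) (-1) = ind (conv3 R c) + ind (conc3 R c) := by
  rw [genB]
  congr 1

-- ---- counting a translated predicate over the cell set ----
theorem sum_ind_filter (S : Finset (Int × Int)) (P : Int × Int → Prop) [DecidablePred P] :
    ∑ c ∈ S, ind (P c) = ((S.filter P).card : Int) := by
  simp [ind, Finset.sum_boole]

theorem filter_card_shift (S : Finset (Int × Int)) (P Q : Int × Int → Prop)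
    [DecidablePred P] [DecidablePred Q] (σ τ : Int × Int → Int × Int)
    (hστ : ∀ c, τ (σ c) = c) (hτσ : ∀ c, σ (τ c) = c)
    (h1 : ∀ c ∈ S, P c → σ c ∈ S ∧ Q (σ c))
    (h2 : ∀ c ∈ S, Q c → τ c ∈ S ∧ P (τ c)) :
    (S.filter P).card = (S.filter Q).card := by
  apply Finset.card_bij' (fun c _ => σ c) (fun c _ => τ c)
  · intro a ha
    simp only [Finset.mem_filter] at ha ⊢
    exact (h1 a ha.1 ha.2)
  · intro a ha
    simp only [Finset.mem_filter] at ha ⊢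
    exact (h2 a ha.1 ha.2)
  · intro a _; exact hστ a
  · intro a _; exact hτσ a

-- each of A's inner-corner events at a cell is B's concave-corner event at a shifted cell
theorem shift0 (R : List (Int × Int)) :
    (R.toFinset.filter (fun c => inner0 R c)).card
      = (R.toFinset.filter (fun c => conc0 R c)).card := by
  apply filter_card_shift _ _ _ (fun c => (c.1, c.2 - 1)) (fun c => (c.1, c.2 + 1))
  · intro c; simp
  · intro c; simp
  · intro c hc h
    simp only [inner0, conc0, List.mem_toFinset, Int.sub_add_cancel, Prod.mk.eta] at *
    tauto
  · intro c hc h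
    simp only [inner0, conc0, List.mem_toFinset, Int.add_sub_cancel, Prod.mk.eta] at *
    tauto
theorem shift1 (R : List (Int × Int)) :
    (R.toFinset.filter (fun c => inner1 R c)).card
      = (R.toFinset.filter (fun c => conc3 R c)).card := by
  apply filter_card_shift _ _ _ (fun c => (c.1, c.2 + 1)) (fun c => (c.1, c.2 - 1))
  · intro c; simp
  · intro c; simp
  · intro c hc h
    simp only [inner1, conc3, List.mem_toFinset, Int.add_sub_cancel, Prod.mk.eta] at *
    tauto
  · intro c hc h
    simp only [inner1, conc3, List.mem_toFinset, Int.sub_add_cancel, Prod.mk.eta] at *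
    tauto
theorem shift2 (R : List (Int × Int)) :
    (R.toFinset.filter (fun c => inner2 R c)).card
      = (R.toFinset.filter (fun c => conc2 R c)).card := by
  apply filter_card_shift _ _ _ (fun c => (c.1 + 1, c.2)) (fun c => (c.1 - 1, c.2))
  · intro c; simp
  · intro c; simp
  · intro c hc h
    simp only [inner2, conc2, List.mem_toFinset, Int.add_sub_cancel, Prod.mk.eta] at *
    tauto
  · intro c hc h
    simp only [inner2, conc2, List.mem_toFinset, Int.sub_add_cancel, Prod.mk.eta] at *
    tauto
theorem shift3 (R : List (Int × Int)) :
    (R.toFinset.filter (fun c => inner3 R c)).card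
      = (R.toFinset.filter (fun c => conc1 R c)).card := by
  apply filter_card_shift _ _ _ (fun c => (c.1 - 1, c.2)) (fun c => (c.1 + 1, c.2))
  · intro c; simp
  · intro c; simp
  · intro c hc h
    simp only [inner3, conc1, List.mem_toFinset, Int.sub_add_cancel, Prod.mk.eta] at *
    tauto
  · intro c hc h
    simp only [inner3, conc1, List.mem_toFinset, Int.add_sub_cancel, Prod.mk.eta] at *
    tauto

-- ---- the global corner counts agree on a duplicate-free region ----
theorem corn_sum_eq (R : List (Int × Int)) (hnd : R.Nodup) :
    (R.map (cornA R)).sum = (R.map (cornB R)).sum := by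
  rw [← List.sum_toFinset _ hnd, ← List.sum_toFinset _ hnd]
  have hA : ∀ c ∈ R.toFinset, cornA R c
      = (ind (conv0 R c) + ind (conv1 R c) + ind (conv2 R c) + ind (conv3 R c))
        + (ind (inner0 R c) + ind (inner1 R c) + ind (inner2 R c) + ind (inner3 R c)) := by
    intro c _
    simp only [cornA, bridgeA0, bridgeA1, bridgeA2, bridgeA3]
    ring
  have hB : ∀ c ∈ R.toFinset, cornB R c
      = (ind (conv0 R c) + ind (conv1 R c) + ind (conv2 R c) + ind (conv3 R c))
        + (ind (conc0 R c) + ind (conc1 R c) + ind (conc2 R c) + ind (conc3 R c)) := by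
    intro c _
    simp only [cornB, bridgeB0, bridgeB1, bridgeB2, bridgeB3]
    ring
  rw [Finset.sum_congr rfl hA, Finset.sum_congr rfl hB]
  simp only [Finset.sum_add_distrib]
  have i0 : ∑ c ∈ R.toFinset, ind (inner0 R c) = ∑ c ∈ R.toFinset, ind (conc0 R c) := by
    rw [sum_ind_filter, sum_ind_filter, shift0]
  have i1 : ∑ c ∈ R.toFinset, ind (inner1 R c) = ∑ c ∈ R.toFinset, ind (conc3 R c) := by
    rw [sum_ind_filter, sum_ind_filter, shift1]
  have i2 : ∑ c ∈ R.toFinset, ind (inner2 R c) = ∑ c ∈ R.toFinset, ind (conc2 R c) := by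
    rw [sum_ind_filter, sum_ind_filter, shift2]
  have i3 : ∑ c ∈ R.toFinset, ind (inner3 R c) = ∑ c ∈ R.toFinset, ind (conc1 R c) := by
    rw [sum_ind_filter, sum_ind_filter, shift3]
  rw [i0, i1, i2, i3]
  ring

-- ===== VERDICT (by name: the statement is the Claim_ definition above) =====
theorem get_region_morphology_spec : Claim_equal_get_region_morphology := by
  intro region _ hnd
  unfold Spec_get_region_morphology get_region_morphology get_region_morphology_alt
  simp only [PySem.Set.mem_ofList]
  rw [foldl_pair_add _ (cornA region) (perim region) _ (fun acc c => stepA region c acc)]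
  rw [foldl_pair_add _ (cornB region) (perimB region) _
      (fun acc c => by rw [stepB, stepBlen])]
  have hperm : (PySem.List.sorted2 region (fun c => c.1) (fun c => c.2)).Perm region :=
    PySem.List.sorted2_perm ..
  have hps : ∀ f : Int × Int → Int,
      ((PySem.List.sorted2 region (fun c => c.1) (fun c => c.2)).map f).sum = (region.map f).sum :=
    fun f => (hperm.map f).sum_eq
  rw [hps, hps, corn_sum_eq region hnd]
  have hpp : region.map (perim region) = region.map (perimB region) :=
    List.map_congr_left (fun c _ => perim_eq region c)
  rw [hpp]
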